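-- pv_equiv track=rewrite | github.com/AdrianMuntean/project-Euler | 60_prime_pair_set.py | extract_combinations
-- ===== SOURCE A (Python) =====
-- def extract_combinations(prime_pairs, no_pairs):
--     min_required_appearances = (no_pairs - 1) * 2
--     combinations = {}
--     for k, pairs in prime_pairs.items():
--         for prime in pairs:
--             combination = combinations.get(prime) or set([])
--             combination.add(k)
--             combinations[prime] = combination
--
--     filtered_appearances = {key: value for key, value\
--                   in combinations.items()\
--                   if min_required_appearances <= len(value)}
--     return filtered_appearances
-- ===== SOURCE B (Python) =====
-- def extract_combinations(prime_pairs, no_pairs):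
--     # Flatten the dict into (prime, key) occurrences, then build each prime's
--     # key set by a per-prime scan over the flat list (no accumulator dict).
--     occurrences = [(prime, k) for k, pairs in prime_pairs.items() for prime in pairs]
--     primes = list(dict.fromkeys(p for p, _ in occurrences))
--     min_required_appearances = (no_pairs - 1) * 2
--     result = {}
--     for p in primes:
--         keys = list(dict.fromkeys(k for q, k in occurrences if q == p))
--         if min_required_appearances <= len(keys):
--             result[p] = set(keys)
--     return result
-- ===== Notes on version B (the rewrite author's own statement) =====
-- stated objective: alternative
-- what changed: Instead of accumulating an inverted prime->keyset dict while iterating (with get-or-new-set updates), B flattens the dict once into a (prime, key) occurrence list, takes the distinct primes in first-appearance order, and builds each prime's key set by a per-prime scan over the flat list, emitting only sets large enough.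
import Mathlib
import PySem

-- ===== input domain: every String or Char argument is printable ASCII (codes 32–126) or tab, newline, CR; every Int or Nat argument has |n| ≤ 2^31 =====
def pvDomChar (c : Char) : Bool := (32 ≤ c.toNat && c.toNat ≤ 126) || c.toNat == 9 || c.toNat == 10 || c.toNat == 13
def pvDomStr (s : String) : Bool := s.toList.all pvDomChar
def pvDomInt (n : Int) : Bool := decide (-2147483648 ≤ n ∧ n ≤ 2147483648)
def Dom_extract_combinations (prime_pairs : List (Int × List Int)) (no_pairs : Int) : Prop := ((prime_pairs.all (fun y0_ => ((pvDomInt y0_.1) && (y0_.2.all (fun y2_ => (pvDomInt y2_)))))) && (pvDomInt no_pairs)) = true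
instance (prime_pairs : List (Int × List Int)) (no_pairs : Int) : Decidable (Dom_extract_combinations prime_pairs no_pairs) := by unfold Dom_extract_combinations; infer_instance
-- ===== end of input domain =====

-- B replaces A's accumulation into an inverted dict by flattening to (prime, key)
-- occurrences and building each prime's key set with a per-prime scan (objective: alternative).

-- ===== PORT A =====
-- 'combinations.get(prime) or set([])': a missing key OR an empty set both yield set([])
def pvOrEmpty (o : Option (PySem.Set Int)) : PySem.Set Int :=
  match o with
  | none => PySem.Set.empty
  | some s => if s.isEmpty then PySem.Set.empty else s

def extract_combinations (prime_pairs : List (Int × List Int)) (no_pairs : Int) : List (Int × List Int) :=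
  let min_required_appearances : Int := (no_pairs - 1) * 2
  let combinations : PySem.Dict Int (PySem.Set Int) :=
    (PySem.Dict.ofList prime_pairs).items.foldl
      (fun combinations kp =>
        kp.2.foldl
          (fun combinations prime =>
            combinations.insert prime
              (PySem.Set.add (pvOrEmpty (combinations.get? prime)) kp.1))
          combinations)
      PySem.Dict.empty
  (combinations.items.foldl
      (fun (d : PySem.Dict Int (PySem.Set Int)) kv =>
        if min_required_appearances ≤ (kv.2.length : Int) then d.insert kv.1 kv.2 else d)
      PySem.Dict.empty).items

-- ===== PORT B =====
def extract_combinations_alt (prime_pairs : List (Int × List Int)) (no_pairs : Int) : List (Int × List Int) :=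
  let occurrences : List (Int × Int) :=
    (PySem.Dict.ofList prime_pairs).items.flatMap
      (fun kp => kp.2.map (fun prime => (prime, kp.1)))
  let primes : List Int := PySem.List.dedup (occurrences.map (fun pk => pk.1))
  let min_required_appearances : Int := (no_pairs - 1) * 2
  ((primes.foldl
      (fun (result : PySem.Dict Int (PySem.Set Int)) p =>
        let keys : List Int :=
          PySem.List.dedup ((occurrences.filter (fun qk => qk.1 == p)).map (fun qk => qk.2))
        if min_required_appearances ≤ (keys.length : Int)
          then result.insert p (PySem.Set.ofList keys) else result)
      PySem.Dict.empty).items)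

-- ===== PRECONDITION & SPEC =====
def Spec_extract_combinations (prime_pairs : List (Int × List Int)) (no_pairs : Int) (out : List (Int × List Int)) : Prop := out = extract_combinations_alt prime_pairs no_pairs
instance (prime_pairs : List (Int × List Int)) (no_pairs : Int) (out : List (Int × List Int)) : Decidable (Spec_extract_combinations prime_pairs no_pairs out) := by unfold Spec_extract_combinations; infer_instance

-- ===== CLAIM (what is proved, stated in full; the proofs are below) =====
def Claim_equal_extract_combinations : Prop := ∀ (prime_pairs : List (Int × List Int)) (no_pairs : Int), Dom_extract_combinations prime_pairs no_pairs → Spec_extract_combinations prime_pairs no_pairs (extract_combinations prime_pairs no_pairs)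

-- ===== LEMMAS AND PROOFS =====

-- A's accumulation step on one (prime, key) occurrence
def pvStep (d : PySem.Dict Int (PySem.Set Int)) (pk : Int × Int) : PySem.Dict Int (PySem.Set Int) :=
  d.insert pk.1 (PySem.Set.add (pvOrEmpty (d.get? pk.1)) pk.2)

-- the keys attached to prime p in the occurrence list, deduped in first-appearance order
def pvGroup (occ : List (Int × Int)) (p : Int) : List Int :=
  PySem.List.dedup ((occ.filter (fun qk => qk.1 == p)).map (fun qk => qk.2))

lemma pvDedup_append (xs : List Int) (x : Int) :
    PySem.List.dedup (xs ++ [x]) = PySem.Set.add (PySem.List.dedup xs) x := by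
  simp [PySem.List.dedup_eq_ofList, PySem.Set.ofList_eq_foldl]

lemma pvGroup_append (l : List (Int × Int)) (p k q : Int) :
    pvGroup (l ++ [(p, k)]) q
      = if q = p then PySem.Set.add (pvGroup l q) k else pvGroup l q := by
  unfold pvGroup
  by_cases h : q = p
  · subst h
    rw [List.filter_append]
    simp only [List.filter, beq_self_eq_true, List.map_append, List.map, pvDedup_append]
    simp
  · rw [List.filter_append]
    have : List.filter (fun qk => qk.1 == q) [(p, k)] = [] := by
      simp [Ne.symm h]
    rw [this, List.append_nil, if_neg h]

-- A's whole accumulation loop, characterised: one entry per distinct prime, in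
-- first-appearance order, carrying that prime's deduped key list.
lemma pvAccum_items (occ : List (Int × Int)) :
    (occ.foldl pvStep PySem.Dict.empty).items
      = (PySem.List.dedup (occ.map (fun pk => pk.1))).map
          (fun p => ((p, (pvGroup occ p : PySem.Set Int)) : Int × PySem.Set Int)) := by
  induction occ using List.reverseRecOn with
  | nil => rfl
  | append_singleton l x ih =>
    obtain ⟨p, k⟩ := x
    rw [List.foldl_append, List.foldl_cons, List.foldl_nil]
    have hkeys : (l.foldl pvStep PySem.Dict.empty).keys = PySem.List.dedup (l.map (fun pk => pk.1)) := by
      simp only [PySem.Dict.keys, ih, List.map_map]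
      simp only [show ((fun x : Int × PySem.Set Int => x.1) ∘ fun p => ((p, (pvGroup l p : PySem.Set Int)) : Int × PySem.Set Int)) = id from rfl, List.map_id]
    have hnd : (PySem.List.dedup (l.map (fun pk => pk.1))).Nodup := PySem.List.nodup_dedup _
    by_cases hp : p ∈ l.map (fun pk => pk.1)
    · -- prime already present: the stored set is updated in place
      have hPmem : p ∈ PySem.List.dedup (l.map (fun pk => pk.1)) :=
        (PySem.List.mem_dedup _ _).mpr hp
      have hval : (l.foldl pvStep PySem.Dict.empty).get? p = some (pvGroup l p) := by
        apply PySem.Dict.get?_of_mem_items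
        · rw [ih]; exact List.mem_map_of_mem hPmem
        · rw [hkeys]; exact hnd
      have hgne : pvGroup l p ≠ [] := by
        obtain ⟨a, ha, hfa⟩ := List.mem_map.mp hp
        intro h0
        have : a.2 ∈ pvGroup l p := by
          unfold pvGroup
          rw [PySem.List.mem_dedup]
          exact List.mem_map_of_mem (List.mem_filter.mpr ⟨ha, by simp [hfa]⟩)
        simp [h0] at this
      have hcont : (l.foldl pvStep PySem.Dict.empty).contains p = true := by
        rw [PySem.Dict.contains_iff_mem_keys, hkeys]; exact hPmem
      have hstep : pvStep (l.foldl pvStep PySem.Dict.empty) (p, k)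
          = (l.foldl pvStep PySem.Dict.empty).insert p (PySem.Set.add (pvGroup l p) k) := by
        show (l.foldl pvStep PySem.Dict.empty).insert p
            (PySem.Set.add (pvOrEmpty ((l.foldl pvStep PySem.Dict.empty).get? p)) k) = _
        rw [hval]
        have : pvOrEmpty (some (pvGroup l p)) = pvGroup l p := by
          simp [pvOrEmpty, List.isEmpty_eq_false_iff.mpr hgne]
        rw [this]
      rw [hstep, PySem.Dict.items_insert_of_contains _ _ hcont, ih]
      have hded : PySem.List.dedup ((l ++ [(p, k)]).map (fun pk => pk.1))
          = PySem.List.dedup (l.map (fun pk => pk.1)) := by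
        rw [List.map_append]
        simp only [List.map]
        rw [pvDedup_append]
        simp only [PySem.Set.add, PySem.Set.contains]
        obtain ⟨a, ha, hfa⟩ := List.mem_map.mp hp
        simp
        exact ⟨a.2, by rw [← hfa]; simpa using ha⟩
      rw [hded, List.map_map]
      apply List.map_congr_left
      intro q hq
      by_cases hqp : q = p
      · subst hqp
        simp only [Function.comp_apply, beq_self_eq_true, if_pos]
        rw [pvGroup_append, if_pos rfl]
      · simp only [Function.comp_apply]
        rw [pvGroup_append, if_neg hqp]
        simp [hqp]
    · -- fresh prime: a new singleton set is appended
      have hPnm : p ∉ PySem.List.dedup (l.map (fun pk => pk.1)) :=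
        fun h => hp ((PySem.List.mem_dedup _ _).mp h)
      have hcont : (l.foldl pvStep PySem.Dict.empty).contains p = false := by
        rw [← Bool.not_eq_true, PySem.Dict.contains_iff_mem_keys, hkeys]; exact hPnm
      have hget : (l.foldl pvStep PySem.Dict.empty).get? p = none := by
        rw [PySem.Dict.get?_eq_none_iff_not_mem_keys, hkeys]; exact hPnm
      have hstep : pvStep (l.foldl pvStep PySem.Dict.empty) (p, k)
          = (l.foldl pvStep PySem.Dict.empty).insert p [k] := by
        show (l.foldl pvStep PySem.Dict.empty).insert p
            (PySem.Set.add (pvOrEmpty ((l.foldl pvStep PySem.Dict.empty).get? p)) k) = _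
        rw [hget]
        simp [pvOrEmpty, PySem.Set.add, PySem.Set.contains, PySem.Set.empty]
      rw [hstep, PySem.Dict.items_insert_of_not_contains _ _ hcont, ih]
      have hded : PySem.List.dedup ((l ++ [(p, k)]).map (fun pk => pk.1))
          = PySem.List.dedup (l.map (fun pk => pk.1)) ++ [p] := by
        rw [List.map_append]
        simp only [List.map]
        rw [pvDedup_append]
        simp only [PySem.Set.add, PySem.Set.contains]
        simp
        intro x hx
        exact hp (List.mem_map_of_mem hx)
      rw [hded, List.map_append]
      congr 1
      · apply List.map_congr_left
        intro q hq
        have hqp : q ≠ p := fun h => hPnm (h ▸ hq)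
        rw [pvGroup_append, if_neg hqp]
      · simp only [List.map]
        have hfil : List.filter (fun qk => qk.1 == p) l = [] := by
          rw [List.filter_eq_nil_iff]
          intro a ha
          simp only [beq_iff_eq]
          exact fun h => hp (h ▸ List.mem_map_of_mem ha)
        rw [pvGroup_append, if_pos rfl]
        unfold pvGroup
        rw [hfil]
        rfl

-- a fold inserting under pairwise-distinct fresh keys, guarded by a predicate,
-- appends exactly the filtered entries
lemma pvFoldl_filter {α : Type} (l : List α) (key : α → Int) (w : α → PySem.Set Int)
    (c : α → Prop) [DecidablePred c] (d : PySem.Dict Int (PySem.Set Int))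
    (hnd : (l.map key).Nodup) (hfresh : ∀ a ∈ l, d.contains (key a) = false) :
    (l.foldl (fun d a => if c a then d.insert (key a) (w a) else d) d).items
      = d.items ++ (l.filter (fun a => decide (c a))).map (fun a => (key a, w a)) := by
  induction l generalizing d with
  | nil => simp
  | cons a t ih =>
    simp only [List.map, List.nodup_cons] at hnd
    obtain ⟨hna, hndt⟩ := hnd
    by_cases hc : c a
    · rw [List.foldl_cons, if_pos hc,
        ih _ hndt (by
          intro b hb
          rw [PySem.Dict.contains_insert]
          have hne : (key b == key a) = false := by
            simp only [beq_eq_false_iff_ne, ne_eq]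
            exact fun h => hna (h ▸ List.mem_map_of_mem hb)
          rw [hne, Bool.false_or]
          exact hfresh b (List.mem_cons_of_mem _ hb)),
        PySem.Dict.items_insert_of_not_contains _ _ (hfresh a List.mem_cons_self)]
      simp [hc]
    · rw [List.foldl_cons, if_neg hc,
        ih _ hndt (fun b hb => hfresh b (List.mem_cons_of_mem _ hb))]
      simp [hc]

-- A's nested loop over the dict items is the flat loop over the occurrence list
lemma pvA_accum (items : List (Int × List Int)) :
    items.foldl
      (fun combinations kp =>
        kp.2.foldl
          (fun combinations prime =>
            combinations.insert prime
              (PySem.Set.add (pvOrEmpty (combinations.get? prime)) kp.1))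
          combinations)
      PySem.Dict.empty
    = (items.flatMap (fun kp => kp.2.map (fun prime => (prime, kp.1)))).foldl
        pvStep PySem.Dict.empty := by
  rw [List.foldl_flatMap]
  simp only [List.foldl_map]
  rfl

-- the common normal form both ports reduce to
def pvNorm (prime_pairs : List (Int × List Int)) (no_pairs : Int) : List (Int × List Int) :=
  let occ := (PySem.Dict.ofList prime_pairs).items.flatMap
      (fun kp => kp.2.map (fun prime => (prime, kp.1)))
  ((PySem.List.dedup (occ.map (fun pk => pk.1))).filter
      (fun p => decide ((no_pairs - 1) * 2 ≤ ((pvGroup occ p).length : Int)))).map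
    (fun p => (p, (pvGroup occ p : List Int)))

-- the filtering pass of A over the characterised accumulator
lemma pvA_fold (occ : List (Int × Int)) (m : Int) :
    (((PySem.List.dedup (occ.map (fun pk => pk.1))).map
        (fun p => ((p, (pvGroup occ p : PySem.Set Int)) : Int × PySem.Set Int))).foldl
      (fun (d : PySem.Dict Int (PySem.Set Int)) kv =>
        if m ≤ (kv.2.length : Int) then d.insert kv.1 kv.2 else d) PySem.Dict.empty).items
    = ((PySem.List.dedup (occ.map (fun pk => pk.1))).filter
        (fun p => decide (m ≤ ((pvGroup occ p).length : Int)))).map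
      (fun p => (p, (pvGroup occ p : List Int))) := by
  have hF := pvFoldl_filter
    ((PySem.List.dedup (occ.map (fun pk => pk.1))).map
      (fun p => ((p, (pvGroup occ p : PySem.Set Int)) : Int × PySem.Set Int)))
    (fun kv : Int × PySem.Set Int => kv.1)
    (fun kv : Int × PySem.Set Int => kv.2)
    (fun kv : Int × PySem.Set Int => m ≤ ((kv.2.length : Int)))
    PySem.Dict.empty
    (by
      rw [List.map_map,
        show ((fun kv : Int × PySem.Set Int => kv.1) ∘ fun p => ((p, (pvGroup occ p : PySem.Set Int)) : Int × PySem.Set Int)) = fun p => p from rfl,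
        List.map_id']
      exact PySem.List.nodup_dedup (occ.map (fun pk => pk.1)))
    (by intro a _; simp)
  simp only [hF]
  rw [List.filter_map, List.map_map]
  simp [Function.comp_def, PySem.Dict.empty]

-- B's loop over the distinct primes, with the same characterisation
lemma pvB_fold (occ : List (Int × Int)) (m : Int) :
    (((PySem.List.dedup (occ.map (fun pk => pk.1))).foldl
      (fun (result : PySem.Dict Int (PySem.Set Int)) p =>
        if m ≤ ((PySem.List.dedup ((occ.filter (fun qk => qk.1 == p)).map (fun qk => qk.2))).length : Int)
          then result.insert p
            (PySem.Set.ofList (PySem.List.dedup ((occ.filter (fun qk => qk.1 == p)).map (fun qk => qk.2))))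
          else result) PySem.Dict.empty).items)
    = ((PySem.List.dedup (occ.map (fun pk => pk.1))).filter
        (fun p => decide (m ≤ ((pvGroup occ p).length : Int)))).map
      (fun p => (p, (pvGroup occ p : List Int))) := by
  have hF := pvFoldl_filter
    (PySem.List.dedup (occ.map (fun pk => pk.1)))
    (fun p : Int => p)
    (fun p : Int =>
      (PySem.Set.ofList (PySem.List.dedup ((occ.filter (fun qk => qk.1 == p)).map (fun qk => qk.2))) : PySem.Set Int))
    (fun p : Int =>
      m ≤ ((PySem.List.dedup ((occ.filter (fun qk => qk.1 == p)).map (fun qk => qk.2))).length : Int))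
    PySem.Dict.empty
    (by simp)
    (by intro a _; simp)
  simp only [hF]
  simp only [PySem.Dict.empty, List.nil_append]
  apply List.map_congr_left
  intro p _
  rw [PySem.Set.ofList_eq_self_of_nodup _ (PySem.List.nodup_dedup _)]
  rfl

lemma pvA_eq (prime_pairs : List (Int × List Int)) (no_pairs : Int) :
    extract_combinations prime_pairs no_pairs = pvNorm prime_pairs no_pairs := by
  unfold extract_combinations pvNorm
  simp only [pvA_accum, pvAccum_items]
  exact pvA_fold _ _

lemma pvB_eq (prime_pairs : List (Int × List Int)) (no_pairs : Int) :
    extract_combinations_alt prime_pairs no_pairs = pvNorm prime_pairs no_pairs := by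
  unfold extract_combinations_alt pvNorm
  exact pvB_fold _ _

-- ===== VERDICT (by name: the statement is the Claim_ definition above) =====
theorem extract_combinations_spec : Claim_equal_extract_combinations := by
  intro prime_pairs no_pairs _
  unfold Spec_extract_combinations
  rw [pvA_eq, pvB_eq]
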